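-- pv_equiv track=rewrite | github.com/YagoRizzetti/AlgoritmosYEstructurasDeDatos1 | PrimerCuatrimestre/SegundoParcial/practica2p2.py | controlpls
-- ===== SOURCE A (Python) =====
-- def controlpls(x):
--     lpmlcs = 0
--     countl = 0
--     tienes = False
--     for i in x:
--         if i == " " or i == ".":
--             if tienes:
--                 if countl > lpmlcs:
--                     lpmlcs = countl
--                 tienes = False
--             countl = 0
--         else:
--             countl += 1
--             if i == "s":
--                 tienes = True
--
--     return lpmlcs
-- ===== SOURCE B (Python) =====
-- def controlpls(x):
--     # tokenise-then-reduce: collect the delimiter-terminated words, then take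
--     # the max length among those containing 's' (0 if none)
--     words = []
--     cur = ''
--     for c in x:
--         if c in ' .':
--             words.append(cur)
--             cur = ''
--         else:
--             cur += c
--     return max((len(w) for w in words if 's' in w), default=0)
-- ===== Notes on version B (the rewrite author's own statement) =====
-- stated objective: alternative
-- what changed: A streams over the characters keeping a running counter, a contains-letter flag and a running maximum; B first tokenises the string into its delimiter-terminated words and then reduces: max length over the words containing the letter s, default 0.
import Mathlib
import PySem

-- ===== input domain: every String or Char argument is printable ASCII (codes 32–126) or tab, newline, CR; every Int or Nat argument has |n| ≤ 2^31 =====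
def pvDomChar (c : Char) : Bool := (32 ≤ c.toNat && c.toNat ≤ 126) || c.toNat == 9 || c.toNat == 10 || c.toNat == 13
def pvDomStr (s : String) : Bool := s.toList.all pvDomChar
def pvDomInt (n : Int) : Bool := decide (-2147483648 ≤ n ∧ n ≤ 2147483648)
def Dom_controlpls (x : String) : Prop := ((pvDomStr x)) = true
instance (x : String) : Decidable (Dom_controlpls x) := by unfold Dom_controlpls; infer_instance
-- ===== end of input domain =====

-- B replaces A's streaming counter/flag/max scan by a tokenise-then-reduce decomposition
-- (collect the delimiter-terminated words, then max length over those containing the letter s); same cost.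

-- ===== PORT A =====
-- literal port of A's for-loop: state (lpmlcs, countl, tienes)
def controlpls (x : String) : Int :=
  (x.toList.foldl
    (fun (st : Int × Int × Bool) i =>
      if i = ' ' ∨ i = '.' then
        (if st.2.2 = true ∧ st.1 < st.2.1 then st.2.1 else st.1, 0, false)
      else
        (st.1, st.2.1 + 1, st.2.2 || (i == 's')))
    (0, 0, false)).1

-- ===== PORT B =====
-- literal port of Source B: build the words list (state (words, cur)), then
-- max(len(w) for w in words if 's' in w, default=0) as a fold of max starting at 0
def controlpls_alt (x : String) : Int :=
  let ws := (x.toList.foldl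
    (fun (st : List (List Char) × List Char) c =>
      if c = ' ' ∨ c = '.' then (st.1 ++ [st.2], []) else (st.1, st.2 ++ [c]))
    ([], [])).1
  (((ws.filter (fun w => PySem.Chars.isIn ['s'] w)).map
      (fun w => (w.length : Int))).foldl (fun a b => max a b) 0)

-- ===== PRECONDITION & SPEC =====
def Spec_controlpls (x : String) (out : Int) : Prop := out = controlpls_alt x
instance (x : String) (out : Int) : Decidable (Spec_controlpls x out) := by unfold Spec_controlpls; infer_instance

-- ===== CLAIM (what is proved, stated in full; the proofs are below) =====
def Claim_equal_controlpls : Prop := ∀ (x : String), Dom_controlpls x → Spec_controlpls x (controlpls x)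

-- ===== LEMMAS AND PROOFS =====

-- the words produced from current partial word `cur` by the remaining input
def pvWordsR (cur : List Char) : List Char → List (List Char)
  | [] => []
  | i :: cs =>
      if i = ' ' ∨ i = '.' then cur :: pvWordsR [] cs else pvWordsR (cur ++ [i]) cs

lemma pvWordsFold (cs : List Char) : ∀ out cur,
    (cs.foldl
      (fun (st : List (List Char) × List Char) c =>
        if c = ' ' ∨ c = '.' then (st.1 ++ [st.2], []) else (st.1, st.2 ++ [c]))
      (out, cur)).1 = out ++ pvWordsR cur cs := by
  induction cs with
  | nil => simp [pvWordsR]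
  | cons i cs ih =>
      intro out cur
      by_cases h : i = ' ' ∨ i = '.' <;> simp [pvWordsR, h, ih]

lemma pvIsIn_singleton (a : Char) (w : List Char) :
    PySem.Chars.isIn [a] w = w.contains a := by
  rcases h : w.contains a with _ | _
  · rw [PySem.Chars.isIn_eq_false_iff]
    intro hinf
    have : a ∈ w := hinf.mem (by simp)
    simp at h
    exact h this
  · have : a ∈ w := by simpa using h
    obtain ⟨s, t, rfl⟩ := List.append_of_mem this
    rw [PySem.Chars.isIn_iff_infix]
    exact ⟨s, t, by simp⟩

lemma pvFoldA (cs : List Char) : ∀ (m : Int) (cur : List Char),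
    (cs.foldl
      (fun (st : Int × Int × Bool) i =>
        if i = ' ' ∨ i = '.' then
          (if st.2.2 = true ∧ st.1 < st.2.1 then st.2.1 else st.1, 0, false)
        else
          (st.1, st.2.1 + 1, st.2.2 || (i == 's')))
      (m, (cur.length : Int), cur.contains 's')).1
    = ((pvWordsR cur cs).filter (fun w => w.contains 's')).foldl
        (fun a w => max a (w.length : Int)) m := by
  induction cs with
  | nil => simp [pvWordsR]
  | cons i cs ih =>
      intro m cur
      by_cases h : i = ' ' ∨ i = '.'
      · rw [List.foldl_cons]
        simp only [h, if_true]
        have H := ih (if cur.contains 's' = true ∧ m < (cur.length : Int) then (cur.length : Int) else m) []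
        simp only [List.length_nil, Nat.cast_zero, List.contains_nil] at H
        rw [H]
        by_cases hs : 's' ∈ cur
        · have hc : cur.contains 's' = true := by simpa using hs
          have hmax : (if cur.contains 's' = true ∧ m < (cur.length : Int) then (cur.length : Int) else m)
              = max m (cur.length : Int) := by
            simp only [hc, true_and]
            rw [max_def]; split_ifs <;> omega
          rw [hmax]
          simp [pvWordsR, h, hs, List.foldl_cons]
        · simp [pvWordsR, h, hs]
      · have hlen : (cur.length : Int) + 1 = (((cur ++ [i]).length : Nat) : Int) := by
          simp [List.length_append]
        have hcont : (cur.contains 's' || (i == 's')) = (cur ++ [i]).contains 's' := by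
          by_cases hi : i = 's'
          · simp [hi]
          · simp [hi, Ne.symm hi]
        rw [List.foldl_cons]
        simp only [h, if_false]
        rw [hlen, hcont]
        simpa [pvWordsR, h] using ih m (cur ++ [i])

-- ===== VERDICT (by name: the statement is the Claim_ definition above) =====
theorem controlpls_spec : Claim_equal_controlpls := by
  intro x _
  unfold Spec_controlpls controlpls controlpls_alt
  rw [pvWordsFold]
  have := pvFoldA x.toList 0 []
  simp only [List.length_nil, Int.ofNat_zero, List.contains_nil] at this
  rw [this]
  simp [List.foldl_map, pvIsIn_singleton]
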